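-- pv_equiv track=rewrite | github.com/StarMadeGalaxy/hello-world | newbee_python-master/some_functions.py | right_half_dict
-- ===== SOURCE A (Python) =====
-- from copy import deepcopy
--
-- def right_half_dict(dictionary):        # Right part funcuion should be create before left
--     right_dict = deepcopy(dictionary)
--     counter = 0
--     if len(dictionary) <= 1:
--         return dictionary
--     else:
--         for key in dictionary.keys():
--             if counter < int(len(dictionary) / 2):
--                 del right_dict[key]
--                 counter += 1
--             else:
--                 break
--     return right_dict
-- ===== SOURCE B (Python) =====
-- from copy import deepcopy
--
-- def right_half_dict(dictionary):
--     # B: slice the second half of the items directly and rebuild, instead of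
--     # deep-copying the whole dict and deleting the first half key by key.
--     if len(dictionary) <= 1:
--         return dictionary
--     items = list(dictionary.items())[len(dictionary) // 2:]
--     return {k: deepcopy(v) for k, v in items}
-- ===== Notes on version B (the rewrite author's own statement) =====
-- stated objective: simpler
-- what changed: Instead of deep-copying the entire dict and deleting the first n//2 keys one by one inside a counter/break loop, B slices the item list at n//2 once and builds the result dict from the retained pairs.
import Mathlib
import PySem

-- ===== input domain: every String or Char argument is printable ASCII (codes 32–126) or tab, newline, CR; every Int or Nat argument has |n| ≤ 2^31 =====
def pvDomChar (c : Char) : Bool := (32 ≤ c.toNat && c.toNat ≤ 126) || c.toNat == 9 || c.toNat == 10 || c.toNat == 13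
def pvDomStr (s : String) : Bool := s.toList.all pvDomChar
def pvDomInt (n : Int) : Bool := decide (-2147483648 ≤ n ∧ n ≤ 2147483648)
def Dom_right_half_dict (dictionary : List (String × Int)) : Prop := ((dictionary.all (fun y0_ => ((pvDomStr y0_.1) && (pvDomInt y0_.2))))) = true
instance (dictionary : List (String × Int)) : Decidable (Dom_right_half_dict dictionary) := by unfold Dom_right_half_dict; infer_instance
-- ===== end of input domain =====

-- B slices the second half of the items directly and rebuilds the dict, instead of
-- deep-copying the whole dict and deleting the first n//2 keys in a counter/break loop.
-- Equivalence of return values is proved; Python identity (len<=1 returns the object itself) is not modelled.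

-- ===== PORT A =====
-- the for-loop over dictionary.keys(): del from right_dict while counter < int(len/2), else break
def right_half_dict_loop (keys : List String) (rd : PySem.Dict String Int)
    (counter half : Int) : PySem.Dict String Int :=
  match keys with
  | [] => rd
  | k :: rest =>
    if counter < half then right_half_dict_loop rest (rd.erase k) (counter + 1) half
    else rd

def right_half_dict (dictionary : List (String × Int)) : List (String × Int) :=
  -- right_dict = deepcopy(dictionary); counter = 0
  if (dictionary.length : Int) ≤ 1 then dictionary
  else
    (right_half_dict_loop (PySem.Dict.mk dictionary).keys (PySem.Dict.mk dictionary)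
      0 ((dictionary.length : Int) / 2)).items

-- ===== PORT B =====
def right_half_dict_alt (dictionary : List (String × Int)) : List (String × Int) :=
  if (dictionary.length : Int) ≤ 1 then dictionary
  else
    -- items = list(dictionary.items())[len//2:]; {k: deepcopy(v) for k, v in items}
    ((dictionary.drop (dictionary.length / 2)).foldl
      (fun acc kv => acc.insert kv.1 kv.2) PySem.Dict.empty).items

-- ===== PRECONDITION & SPEC =====
-- Pre_: the argument stands for a Python dict, whose keys are necessarily distinct;
-- association lists with duplicate keys do not arise from any dict input.
def Pre_right_half_dict (dictionary : List (String × Int)) : Prop :=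
  (dictionary.map Prod.fst).Nodup

instance (dictionary : List (String × Int)) : Decidable (Pre_right_half_dict dictionary) := by
  unfold Pre_right_half_dict; infer_instance

def pvWitness_right_half_dict : (List (String × Int)) := [("a", 1), ("b", 2), ("c", 3)]

def Spec_right_half_dict (dictionary : List (String × Int)) (out : List (String × Int)) : Prop :=
  out = right_half_dict_alt dictionary

instance (dictionary : List (String × Int)) (out : List (String × Int)) :
    Decidable (Spec_right_half_dict dictionary out) := by
  unfold Spec_right_half_dict; infer_instance

-- ===== CLAIM (what is proved, stated in full; the proofs are below) =====
def Claim_equal_right_half_dict : Prop :=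
  ∀ (dictionary : List (String × Int)), Dom_right_half_dict dictionary →
    Pre_right_half_dict dictionary →
    Spec_right_half_dict dictionary (right_half_dict dictionary)

-- ===== LEMMAS AND PROOFS =====

-- erasing the head key from a dict whose keys are distinct drops the head pair
lemma erase_head (k : String) (v : Int) (t : List (String × Int))
    (h : k ∉ t.map Prod.fst) :
    (PySem.Dict.mk ((k, v) :: t)).erase k = PySem.Dict.mk t := by
  have hf : ∀ p ∈ t, (!(p.1 == k)) = true := by
    intro p hp
    have hne : p.1 ≠ k := fun hk => h (hk ▸ List.mem_map_of_mem hp)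
    simp [hne]
  simp [PySem.Dict.erase, List.filter_cons, List.filter_eq_self.2 hf]

-- A's delete loop, run over the keys of rd with j deletions remaining, drops the first j pairs
lemma loop_drop : ∀ (rd : List (String × Int)) (c : Int) (j : Nat),
    (rd.map Prod.fst).Nodup → j ≤ rd.length →
    right_half_dict_loop (rd.map Prod.fst) (PySem.Dict.mk rd) c (c + j)
      = PySem.Dict.mk (rd.drop j) := by
  intro rd
  induction rd with
  | nil => intro c j _ hj; simp at hj; subst hj; simp [right_half_dict_loop]
  | cons p t ih =>
    intro c j hn hj
    obtain ⟨k, v⟩ := p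
    cases j with
    | zero => simp [right_half_dict_loop]
    | succ j' =>
      simp only [List.map_cons, right_half_dict_loop]
      rw [if_pos (by omega)]
      simp only [List.map_cons, List.nodup_cons] at hn
      rw [erase_head k v t hn.1]
      have : c + 1 + (j' : Int) = c + (j' + 1 : Nat) := by push_cast; ring
      rw [← this, ih (c + 1) j' hn.2 (by simpa using hj)]
      rfl

theorem right_half_dict_spec : Claim_equal_right_half_dict := by
  intro d _ hpre
  unfold Spec_right_half_dict right_half_dict right_half_dict_alt
  by_cases h1 : (d.length : Int) ≤ 1
  · simp [h1]
  · rw [if_neg h1, if_neg h1]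
    have hkeys : (PySem.Dict.mk d).keys = d.map Prod.fst := by
      simp [PySem.Dict.keys]
    have hcast : ((d.length : Int)) / 2 = (0 : Int) + (d.length / 2 : Nat) := by
      omega
    rw [hkeys, hcast, loop_drop d 0 (d.length / 2) hpre (Nat.div_le_self _ _)]
    have hnd : ((d.drop (d.length / 2)).map Prod.fst).Nodup := by
      rw [List.map_drop]
      exact hpre.sublist (List.drop_sublist _ _)
    rw [PySem.Dict.items_foldl_insert_fresh (d.drop (d.length / 2)) Prod.fst Prod.snd
      PySem.Dict.empty (fun a _ => PySem.Dict.contains_empty _) hnd]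
    simp [PySem.Dict.empty]
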